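-- pv_equiv track=rewrite | github.com/jmaelectro/latex-word-equation-converter | main.py | _cluster_from_slug
-- ===== SOURCE A (Python) =====
-- def _cluster_from_slug(slug: str) -> str:
--     s = (slug or "").lower()
--     if any(k in s for k in ("chatgpt", "copilot", "perplexity", "claude")):
--         return "chatgpt"
--     if "gemini" in s:
--         return "gemini"
--     if any(k in s for k in ("pandoc", "markdown")):
--         return "pandoc"
--     if any(k in s for k in ("overleaf", "obsidian", "notion", "thesis", "tfg", "tfm")):
--         return "overleaf"
--     if any(k in s for k in ("omml", "cambria", "unicode", "linear-format", "word-equation")):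
--         return "omml"
--     if any(k in s for k in ("latex", "matrices", "delimitadores")):
--         return "overleaf"
--     if "ia-" in s:
--         return "chatgpt"
--     return "omml"
-- ===== SOURCE B (Python) =====
-- # B: position scan with branch-and-bound. Instead of testing each keyword for
-- # substring membership, walk the string left to right once; at each position
-- # try to match a keyword of better (lower) priority than the best found so far,
-- # shrinking the candidate range as matches are found.  Same result: the label
-- # of the lowest-priority keyword occurring anywhere in the string.
-- _KW = ["chatgpt", "copilot", "perplexity", "claude",
--        "gemini",
--        "pandoc", "markdown",
--        "overleaf", "obsidian", "notion", "thesis", "tfg", "tfm",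
--        "omml", "cambria", "unicode", "linear-format", "word-equation",
--        "latex", "matrices", "delimitadores",
--        "ia-"]
-- _LABEL = ["chatgpt"] * 4 + ["gemini"] + ["pandoc"] * 2 + ["overleaf"] * 6 + \
--          ["omml"] * 5 + ["overleaf"] * 3 + ["chatgpt"]
--
-- def _cluster_from_slug(slug: str) -> str:
--     s = (slug or "").lower()
--     best = len(_KW)
--     for i in range(len(s)):
--         for r in range(best):
--             if s.startswith(_KW[r], i):
--                 best = r
--                 break
--     return _LABEL[best] if best < len(_KW) else "omml"
-- ===== Notes on version B (the rewrite author's own statement) =====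
-- stated objective: alternative
-- what changed: Instead of testing each keyword for substring membership in priority order, B walks the string once position by position, at each index matching only keywords of better priority than the current best (branch-and-bound accumulator), then maps the best priority to its label.
import Mathlib
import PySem

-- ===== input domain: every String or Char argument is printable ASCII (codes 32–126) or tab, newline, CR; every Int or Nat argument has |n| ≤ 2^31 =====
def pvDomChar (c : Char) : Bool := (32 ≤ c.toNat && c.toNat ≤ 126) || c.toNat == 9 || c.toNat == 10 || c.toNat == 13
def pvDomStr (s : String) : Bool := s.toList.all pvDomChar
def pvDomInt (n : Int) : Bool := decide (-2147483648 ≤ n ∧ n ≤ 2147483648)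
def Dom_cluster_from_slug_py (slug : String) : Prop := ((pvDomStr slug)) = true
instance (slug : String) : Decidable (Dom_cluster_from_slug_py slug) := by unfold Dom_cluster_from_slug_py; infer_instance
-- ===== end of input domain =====

-- B replaces A's chain of substring-membership tests by a single left-to-right
-- position scan with a branch-and-bound best-priority accumulator (objective: alternative).

-- ===== PORT A =====
def cluster_from_slug_py (slug : String) : String :=
  let s := PySem.Str.lower (if slug == "" then "" else slug)
  if PySem.Str.isIn "chatgpt" s || PySem.Str.isIn "copilot" s || PySem.Str.isIn "perplexity" s || PySem.Str.isIn "claude" s then "chatgpt"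
  else if PySem.Str.isIn "gemini" s then "gemini"
  else if PySem.Str.isIn "pandoc" s || PySem.Str.isIn "markdown" s then "pandoc"
  else if PySem.Str.isIn "overleaf" s || PySem.Str.isIn "obsidian" s || PySem.Str.isIn "notion" s || PySem.Str.isIn "thesis" s || PySem.Str.isIn "tfg" s || PySem.Str.isIn "tfm" s then "overleaf"
  else if PySem.Str.isIn "omml" s || PySem.Str.isIn "cambria" s || PySem.Str.isIn "unicode" s || PySem.Str.isIn "linear-format" s || PySem.Str.isIn "word-equation" s then "omml"
  else if PySem.Str.isIn "latex" s || PySem.Str.isIn "matrices" s || PySem.Str.isIn "delimitadores" s then "overleaf"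
  else if PySem.Str.isIn "ia-" s then "chatgpt"
  else "omml"

-- ===== PORT B =====
def clusterKW : List String :=
  ["chatgpt", "copilot", "perplexity", "claude",
   "gemini",
   "pandoc", "markdown",
   "overleaf", "obsidian", "notion", "thesis", "tfg", "tfm",
   "omml", "cambria", "unicode", "linear-format", "word-equation",
   "latex", "matrices", "delimitadores",
   "ia-"]

def clusterLabel : List String :=
  ["chatgpt", "chatgpt", "chatgpt", "chatgpt",
   "gemini",
   "pandoc", "pandoc",
   "overleaf", "overleaf", "overleaf", "overleaf", "overleaf", "overleaf",
   "omml", "omml", "omml", "omml", "omml",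
   "overleaf", "overleaf", "overleaf",
   "chatgpt"]

-- s.startswith(_KW[r], i) on the char list; inner 'for r in range(best): … break'
-- becomes a first-match search over the shrinking candidate range.
def cluster_from_slug_py_alt (slug : String) : String :=
  let s := PySem.Str.lower (if slug == "" then "" else slug)
  let cs := s.toList
  let n := clusterKW.length
  let best := (List.range cs.length).foldl (fun best i =>
      match (List.range best).find? (fun r => ((clusterKW.getD r "").toList).isPrefixOf (cs.drop i)) with
      | some r => r
      | none => best) n
  if best < n then clusterLabel.getD best "omml" else "omml"

-- ===== PRECONDITION & SPEC =====
def Spec_cluster_from_slug_py (slug : String) (out : String) : Prop := out = cluster_from_slug_py_alt slug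
instance (slug : String) (out : String) : Decidable (Spec_cluster_from_slug_py slug out) := by unfold Spec_cluster_from_slug_py; infer_instance

-- ===== CLAIM (what is proved, stated in full; the proofs are below) =====
def Claim_equal_cluster_from_slug_py : Prop := ∀ (slug : String), Dom_cluster_from_slug_py slug → Spec_cluster_from_slug_py slug (cluster_from_slug_py slug)

-- ===== LEMMAS AND PROOFS =====

-- find? over an initial segment of ℕ returns the least index satisfying p.
theorem find?_range_eq_some_iff (p : Nat → Bool) (n r : Nat) :
    (List.range n).find? p = some r ↔ (r < n ∧ p r = true ∧ ∀ j, j < r → p j = false) := by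
  rw [List.find?_eq_some_iff_getElem]
  constructor
  · rintro ⟨hp, i, hi, hgt, hlt⟩
    simp only [List.getElem_range] at hgt
    subst hgt
    simp only [List.length_range] at hi
    refine ⟨hi, hp, fun j hj => ?_⟩
    have := hlt j hj
    simpa using this
  · rintro ⟨hr, hp, hlt⟩
    exact ⟨hp, r, by simpa using hr, by simp, fun j hj => by simpa using hlt j hj⟩

-- Invariant of B's outer loop: after scanning positions [0, m), the accumulator is the
-- least priority r whose keyword matches at some scanned position (n if none).
theorem scan_foldl_eq_find (mt : Nat → Nat → Bool) (n : Nat) : ∀ m,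
    (List.range m).foldl (fun best i =>
        match (List.range best).find? (fun r => mt r i) with
        | some r => r
        | none => best) n
      = ((List.range n).find? (fun r => (List.range m).any (fun i => mt r i))).getD n := by
  intro m
  induction m with
  | zero =>
    have h0 : (List.range n).find? (fun r => (List.range 0).any (fun i => mt r i)) = none := by
      rw [List.find?_eq_none]; intro x _; simp
    rw [List.range_zero, List.foldl_nil]
    rw [List.range_zero] at h0
    rw [h0, Option.getD_none]
  | succ m ih =>
    conv_lhs => rw [List.range_succ]
    rw [List.foldl_append, List.foldl_cons, List.foldl_nil, ih]
    have hany : ∀ r, (List.range (m+1)).any (fun i => mt r i)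
        = ((List.range m).any (fun i => mt r i) || mt r m) := by
      intro r; rw [List.range_succ]; simp
    cases hfm : (List.range n).find? (fun r => (List.range m).any (fun i => mt r i)) with
    | some r0 =>
      rw [find?_range_eq_some_iff] at hfm
      obtain ⟨hr0n, hr0p, hr0min⟩ := hfm
      simp only [Option.getD_some]
      cases hin : (List.range r0).find? (fun r => mt r m) with
      | some r1 =>
        rw [find?_range_eq_some_iff] at hin
        obtain ⟨hr1r0, hr1p, hr1min⟩ := hin
        have : (List.range n).find? (fun r => (List.range (m+1)).any (fun i => mt r i)) = some r1 := by
          rw [find?_range_eq_some_iff]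
          refine ⟨lt_trans hr1r0 hr0n, ?_, ?_⟩
          · rw [hany]; simp [hr1p]
          · intro j hj
            rw [hany]
            have h1 : ((List.range m).any (fun i => mt j i)) = false :=
              hr0min j (lt_trans hj hr1r0)
            have h2 : mt j m = false := hr1min j hj
            simp [h1, h2]
        rw [this]; rfl
      | none =>
        rw [List.find?_eq_none] at hin
        have : (List.range n).find? (fun r => (List.range (m+1)).any (fun i => mt r i)) = some r0 := by
          rw [find?_range_eq_some_iff]
          refine ⟨hr0n, ?_, ?_⟩
          · rw [hany]; simp [hr0p]
          · intro j hj
            rw [hany]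
            have h1 := hr0min j hj
            have h2 : mt j m = false := by
              have := hin j (List.mem_range.mpr hj)
              simpa using this
            simp [h1, h2]
        rw [this]; rfl
    | none =>
      rw [List.find?_eq_none] at hfm
      simp only [Option.getD_none]
      cases hin : (List.range n).find? (fun r => mt r m) with
      | some r1 =>
        rw [find?_range_eq_some_iff] at hin
        obtain ⟨hr1n, hr1p, hr1min⟩ := hin
        have : (List.range n).find? (fun r => (List.range (m+1)).any (fun i => mt r i)) = some r1 := by
          rw [find?_range_eq_some_iff]
          refine ⟨hr1n, ?_, ?_⟩
          · rw [hany]; simp [hr1p]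
          · intro j hj
            rw [hany]
            have h1 : ((List.range m).any (fun i => mt j i)) = false := by
              have := hfm j (List.mem_range.mpr (lt_trans hj hr1n))
              simpa using this
            have h2 : mt j m = false := hr1min j hj
            simp [h1, h2]
        rw [this]; rfl
      | none =>
        rw [List.find?_eq_none] at hin
        have : (List.range n).find? (fun r => (List.range (m+1)).any (fun i => mt r i)) = none := by
          rw [List.find?_eq_none]
          intro j hjm
          rw [hany]
          have h1 : ((List.range m).any (fun i => mt j i)) = false := by
            have := hfm j hjm; simpa using this
          have h2 : mt j m = false := by
            have := hin j hjm; simpa using this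
          simp [h1, h2]
        rw [this]; rfl

-- A nonempty keyword occurs as a substring iff it matches at some position i < length.
theorem any_prefix_eq_isIn (kw : List Char) (cs : List Char) (hkw : kw ≠ []) :
    (List.range cs.length).any (fun i => kw.isPrefixOf (cs.drop i)) = PySem.Chars.isIn kw cs := by
  cases hc : PySem.Chars.isIn kw cs with
  | true =>
    obtain ⟨j, hj⟩ := (PySem.Chars.exists_prefix_drop_iff_isIn (sub := kw) (s := cs)).mpr hc
    have hjlt : j < cs.length := by
      by_contra h
      push Not at h
      rw [List.drop_eq_nil_of_le h] at hj
      exact hkw (List.prefix_nil.mp hj)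
    rw [List.any_eq_true]
    exact ⟨j, List.mem_range.mpr hjlt, by simpa [List.isPrefixOf_iff_prefix] using hj⟩
  | false =>
    rw [List.any_eq_false]
    intro i _
    simp only [List.isPrefixOf_iff_prefix]
    intro hpre
    have : PySem.Chars.isIn kw cs = true :=
      (PySem.Chars.exists_prefix_drop_iff_isIn (sub := kw) (s := cs)).mp ⟨i, hpre⟩
    rw [hc] at this; exact absurd this (by simp)

theorem find?_congr_mem {α : Type} (l : List α) (p q : α → Bool)
    (h : ∀ a ∈ l, p a = q a) : l.find? p = l.find? q := by
  induction l with
  | nil => rfl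
  | cons a l ih =>
    rw [List.find?_cons, List.find?_cons, h a (List.mem_cons_self), ih (fun b hb => h b (List.mem_cons_of_mem a hb))]

theorem range22 : List.range 22 = [0,1,2,3,4,5,6,7,8,9,10,11,12,13,14,15,16,17,18,19,20,21] := by rfl

-- Reduce B's body to the first-match rule over substring tests of the lowered string.
theorem alt_eq_first_rule (s : String) :
    (let cs := s.toList
     let n := clusterKW.length
     let best := (List.range cs.length).foldl (fun best i =>
        match (List.range best).find? (fun r => ((clusterKW.getD r "").toList).isPrefixOf (cs.drop i)) with
        | some r => r
        | none => best) n
     if best < n then clusterLabel.getD best "omml" else "omml")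
    = (match (List.range 22).find? (fun r => PySem.Str.isIn (clusterKW.getD r "") s) with
       | some r => clusterLabel.getD r "omml"
       | none => "omml") := by
  have hn : clusterKW.length = 22 := by rfl
  simp only [hn]
  rw [scan_foldl_eq_find]
  have hcongr : (List.range 22).find? (fun r => (List.range s.toList.length).any
        (fun i => ((clusterKW.getD r "").toList).isPrefixOf (s.toList.drop i)))
      = (List.range 22).find? (fun r => PySem.Str.isIn (clusterKW.getD r "") s) := by
    apply find?_congr_mem
    intro r hr
    have hkw : (clusterKW.getD r "").toList ≠ [] := by
      rw [range22] at hr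
      fin_cases hr <;> decide
    rw [any_prefix_eq_isIn _ _ hkw]
    simp [PySem.Str.isIn]
  rw [hcongr]
  cases hf : (List.range 22).find? (fun r => PySem.Str.isIn (clusterKW.getD r "") s) with
  | some r =>
    have hrlt : r < 22 := by
      have := List.mem_of_find?_eq_some hf
      simpa using this
    simp [hrlt]
  | none => simp

-- A's if/any chain equals the same first-match rule, by exhausting the 22 membership booleans.
theorem chain_eq_first_rule (s : String) :
    (if PySem.Str.isIn "chatgpt" s || PySem.Str.isIn "copilot" s || PySem.Str.isIn "perplexity" s || PySem.Str.isIn "claude" s then "chatgpt"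
     else if PySem.Str.isIn "gemini" s then "gemini"
     else if PySem.Str.isIn "pandoc" s || PySem.Str.isIn "markdown" s then "pandoc"
     else if PySem.Str.isIn "overleaf" s || PySem.Str.isIn "obsidian" s || PySem.Str.isIn "notion" s || PySem.Str.isIn "thesis" s || PySem.Str.isIn "tfg" s || PySem.Str.isIn "tfm" s then "overleaf"
     else if PySem.Str.isIn "omml" s || PySem.Str.isIn "cambria" s || PySem.Str.isIn "unicode" s || PySem.Str.isIn "linear-format" s || PySem.Str.isIn "word-equation" s then "omml"
     else if PySem.Str.isIn "latex" s || PySem.Str.isIn "matrices" s || PySem.Str.isIn "delimitadores" s then "overleaf"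
     else if PySem.Str.isIn "ia-" s then "chatgpt"
     else "omml")
    = (match (List.range 22).find? (fun r => PySem.Str.isIn (clusterKW.getD r "") s) with
       | some r => clusterLabel.getD r "omml"
       | none => "omml") := by
  rw [range22]
  simp only [clusterKW, clusterLabel]
  by_cases h1 : PySem.Str.isIn "chatgpt" s = true
  · simp_all [List.find?]
  by_cases h2 : PySem.Str.isIn "copilot" s = true
  · simp_all [List.find?]
  by_cases h3 : PySem.Str.isIn "perplexity" s = true
  · simp_all [List.find?]
  by_cases h4 : PySem.Str.isIn "claude" s = true
  · simp_all [List.find?]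
  by_cases h5 : PySem.Str.isIn "gemini" s = true
  · simp_all [List.find?]
  by_cases h6 : PySem.Str.isIn "pandoc" s = true
  · simp_all [List.find?]
  by_cases h7 : PySem.Str.isIn "markdown" s = true
  · simp_all [List.find?]
  by_cases h8 : PySem.Str.isIn "overleaf" s = true
  · simp_all [List.find?]
  by_cases h9 : PySem.Str.isIn "obsidian" s = true
  · simp_all [List.find?]
  by_cases h10 : PySem.Str.isIn "notion" s = true
  · simp_all [List.find?]
  by_cases h11 : PySem.Str.isIn "thesis" s = true
  · simp_all [List.find?]
  by_cases h12 : PySem.Str.isIn "tfg" s = true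
  · simp_all [List.find?]
  by_cases h13 : PySem.Str.isIn "tfm" s = true
  · simp_all [List.find?]
  by_cases h14 : PySem.Str.isIn "omml" s = true
  · simp_all [List.find?]
  by_cases h15 : PySem.Str.isIn "cambria" s = true
  · simp_all [List.find?]
  by_cases h16 : PySem.Str.isIn "unicode" s = true
  · simp_all [List.find?]
  by_cases h17 : PySem.Str.isIn "linear-format" s = true
  · simp_all [List.find?]
  by_cases h18 : PySem.Str.isIn "word-equation" s = true
  · simp_all [List.find?]
  by_cases h19 : PySem.Str.isIn "latex" s = true
  · simp_all [List.find?]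
  by_cases h20 : PySem.Str.isIn "matrices" s = true
  · simp_all [List.find?]
  by_cases h21 : PySem.Str.isIn "delimitadores" s = true
  · simp_all [List.find?]
  by_cases h22 : PySem.Str.isIn "ia-" s = true
  · simp_all [List.find?]
  simp_all [List.find?]

-- ===== VERDICT (by name: the statement is the Claim_ definition above) =====
theorem cluster_from_slug_py_spec : Claim_equal_cluster_from_slug_py := by
  intro slug _
  unfold Spec_cluster_from_slug_py cluster_from_slug_py cluster_from_slug_py_alt
  rw [alt_eq_first_rule, chain_eq_first_rule]
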